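-- pv_equiv track=rewrite | github.com/DoctorLai/ACM | binarysearch/Gene-Mutation-Groups/Gene-Mutation-Groups.py | solve
-- ===== SOURCE A (Python) =====
-- def solve(genes):
--     left = set(genes)
--
--     def dfs(a):
--         left.remove(a)
--         for i in range(len(a)):
--             for x in ('A', 'G', 'T', 'C'):
--                 c = a[:i] + x + a[i + 1:]
--                 if c in left:
--                     dfs(c)
--
--     ans = 0
--     for i in genes:
--         if i in left:
--             ans += 1
--             dfs(i)
--
--     return ans
-- ===== SOURCE B (Python) =====
-- def solve(genes):
--     def edge(u, v):
--         if len(u) != len(v):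
--             return False
--         diffs = [i for i in range(len(u)) if u[i] != v[i]]
--         return len(diffs) == 1 and v[diffs[0]] in 'AGTC'
--
--     left = set(genes)
--     ans = 0
--     for g in genes:
--         if g in left:
--             ans += 1
--             left.remove(g)
--             queue = [g]
--             while queue:
--                 u = queue.pop(0)
--                 ts = [w for w in left if edge(u, w)]
--                 for w in ts:
--                     left.remove(w)
--                 queue += ts
--     return ans
-- ===== Notes on version B (the rewrite author's own statement) =====
-- stated objective: alternative
-- what changed: Replaces A's recursive DFS that generates all 4*len(g) one-letter mutation strings per node with an explicit FIFO-queue traversal that finds each node's neighbours by scanning the remaining gene set with a pairwise exactly-one-mismatch comparison.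
import Mathlib
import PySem

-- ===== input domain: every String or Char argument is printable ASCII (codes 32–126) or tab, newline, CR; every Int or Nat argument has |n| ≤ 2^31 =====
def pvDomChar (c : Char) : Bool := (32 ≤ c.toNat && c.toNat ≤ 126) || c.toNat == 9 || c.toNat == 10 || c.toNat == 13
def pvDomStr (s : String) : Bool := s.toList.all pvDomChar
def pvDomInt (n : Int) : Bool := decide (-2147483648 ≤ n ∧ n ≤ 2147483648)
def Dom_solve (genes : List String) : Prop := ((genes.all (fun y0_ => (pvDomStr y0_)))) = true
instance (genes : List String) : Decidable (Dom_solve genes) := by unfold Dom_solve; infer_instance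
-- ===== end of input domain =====

-- B replaces A's recursive DFS over generated one-letter mutations by a queue-driven
-- traversal whose neighbours are found by a pairwise one-mismatch comparison (objective: alternative).

-- ===== PORT A =====
def mutStr (a : String) (i : Int) (x : Char) : String :=
  String.ofList (PySem.List.slice a.toList none (some i) ++ x :: PySem.List.slice a.toList (some (i + 1)) none)

def nbrs (a : String) : List String :=
  (PySem.List.pyRange 0 (PySem.Str.len a) 1).flatMap (fun i => ['A','G','T','C'].map (fun x => mutStr a i x))

mutual
def dfsA : Nat → String → List String → List String
  | 0, _, left => left
  | f + 1, a, left => dfsLoop f (nbrs a) (PySem.Set.discard left a)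
termination_by f _ _ => (f, 0, 0)

def dfsLoop : Nat → List String → List String → List String
  | _, [], cur => cur
  | f, c :: cs, cur => dfsLoop f cs (if c ∈ cur then dfsA f c cur else cur)
termination_by f cs _ => (f, 1, cs.length)
end

def solve (genes : List String) : Int :=
  (genes.foldl
    (fun (st : List String × Int) i =>
      if i ∈ st.1 then (dfsA st.1.length i st.1, st.2 + 1) else st)
    (PySem.Set.ofList genes, 0)).2

def edgeB (u v : String) : Bool :=
  if PySem.Str.len u != PySem.Str.len v then false
  else
    let diffs := (PySem.List.pyRange 0 (PySem.Str.len u) 1).filter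
      (fun i => PySem.Str.pyGet? u i != PySem.Str.pyGet? v i)
    PySem.List.len diffs == 1 &&
      ((PySem.Str.pyGet? v (PySem.List.pyGetD diffs 0 0)).any
        (fun ch => ['A','G','T','C'].contains ch))

theorem countP_split (l : List String) (p : String → Bool) :
    l.countP p + l.countP (fun x => !p x) = l.length := by
  induction l with
  | nil => simp
  | cons a l ih => by_cases h : p a <;> simp [h] <;> omega

theorem foldl_discard (ts l : List String) :
    ts.foldl (fun l w => PySem.Set.discard l w) l = l.filter (fun x => !(ts.contains x)) := by
  induction ts generalizing l with
  | nil => simp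
  | cons w ts ih =>
    rw [List.foldl_cons, ih]
    show (PySem.Set.discard l w).filter _ = _
    simp only [PySem.Set.discard, List.filter_filter]
    apply List.filter_congr
    intro x _
    simp [Bool.and_comm, Bool.beq_eq_decide_eq]

theorem bfs_dec (u : String) (rest left : List String) :
    (rest ++ left.filter (fun w => edgeB u w)).length +
      2 * ((left.filter (fun w => edgeB u w)).foldl (fun l w => PySem.Set.discard l w) left).length
    < (u :: rest).length + 2 * left.length := by
  rw [foldl_discard]
  have h2 : ∀ x ∈ left, edgeB u x = true → ((left.filter (fun w => edgeB u w)).contains x) = true := by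
    intro x hx he; simp [List.mem_filter, hx, he]
  have hm : left.countP (fun w => edgeB u w)
      ≤ left.countP (fun x => (left.filter (fun w => edgeB u w)).contains x) :=
    List.countP_mono_left h2
  have hs := countP_split left (fun x => (left.filter (fun w => edgeB u w)).contains x)
  simp only [List.length_append, List.length_cons, ← List.countP_eq_length_filter]
  omega

def bfsLoop : List String → List String → List String
  | [], left => left
  | u :: rest, left =>
    bfsLoop (rest ++ left.filter (fun w => edgeB u w))
      ((left.filter (fun w => edgeB u w)).foldl (fun l w => PySem.Set.discard l w) left)
termination_by stack left => stack.length + 2 * left.length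
decreasing_by
  rw [List.foldl_subtype (g := fun l w => PySem.Set.discard l w) (fun _ _ _ => rfl)]
  simp only [List.unattach_filter, List.unattach_attach]
  exact bfs_dec u rest left

def solve_alt (genes : List String) : Int :=
  (genes.foldl
    (fun (st : List String × Int) g =>
      if g ∈ st.1 then (bfsLoop [g] (PySem.Set.discard st.1 g), st.2 + 1) else st)
    (PySem.Set.ofList genes, 0)).2

-- ===== PRECONDITION & SPEC =====
def Spec_solve (genes : List String) (out : Int) : Prop := out = solve_alt genes
instance (genes : List String) (out : Int) : Decidable (Spec_solve genes out) := by unfold Spec_solve; infer_instance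

-- ===== CLAIM (what is proved, stated in full; the proofs are below) =====
def Claim_equal_solve : Prop := ∀ (genes : List String), Dom_solve genes → Spec_solve genes (solve genes)

-- ===== LEMMAS AND PROOFS =====

theorem filter_eq_singleton_of {l : List Nat} {q : Nat → Bool} {k : Nat}
    (hk : k ∈ l) (hq : q k = true) (hnd : l.Nodup)
    (huniq : ∀ j ∈ l, q j = true → j = k) : l.filter q = [k] := by
  induction l with
  | nil => simp at hk
  | cons a l ih =>
    obtain ⟨hal, hndl⟩ := List.nodup_cons.1 hnd
    rcases List.mem_cons.1 hk with rfl | hkl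
    · rw [List.filter_cons, if_pos (by simp [hq])]
      have : l.filter q = [] := by
        rw [List.filter_eq_nil_iff]
        intro j hj hqj
        exact hal ((huniq j (List.mem_cons_of_mem _ hj) hqj) ▸ hj)
      rw [this]
    · have hak : a ≠ k := fun hh => hal (hh ▸ hkl)
      have hqa : q a = false := by
        by_contra hh
        exact hak (huniq a List.mem_cons_self (by revert hh; cases q a <;> simp))
      rw [List.filter_cons, if_neg (by simp [hqa])]
      exact ih hkl hndl (fun j hj => huniq j (List.mem_cons_of_mem _ hj))

theorem mutStr_toList (a : String) (k : Nat) (x : Char) (h : k < a.toList.length) :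
    (mutStr a (k : Int) x).toList = a.toList.set k x := by
  unfold mutStr
  rw [String.toList_ofList, List.set_eq_take_cons_drop x h]
  rw [PySem.List.slice_to_natCast]
  have : ((k : Int) + 1) = ((k + 1 : Nat) : Int) := by push_cast; ring
  rw [this, PySem.List.slice_from_natCast]

theorem mem_nbrs (a c : String) : c ∈ nbrs a ↔
    ∃ k : Nat, k < a.toList.length ∧ ∃ x ∈ (['A','G','T','C'] : List Char),
      c.toList = a.toList.set k x := by
  unfold nbrs
  rw [PySem.Str.len_eq, PySem.List.pyRange_zero_nat]
  simp only [List.flatMap_map, List.mem_flatMap, List.mem_map, List.mem_range]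
  constructor
  · rintro ⟨k, hk, x, hx, rfl⟩
    exact ⟨k, hk, x, hx, mutStr_toList a k x hk⟩
  · rintro ⟨k, hk, x, hx, hset⟩
    refine ⟨k, hk, x, hx, ?_⟩
    apply String.toList_inj.1
    rw [mutStr_toList a k x hk, hset]

theorem nbrs_edge (a c : String) : edgeB a c = true ↔ (c ∈ nbrs a ∧ c ≠ a) := by
  by_cases hlen : a.toList.length = c.toList.length
  · unfold edgeB
    rw [if_neg (by simp [PySem.Str.len_eq, hlen])]
    rw [PySem.Str.len_eq, PySem.List.pyRange_zero_nat]
    rw [List.filter_map]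
    have hpred : ∀ k : Nat, k < a.toList.length →
        ((fun i => PySem.Str.pyGet? a i != PySem.Str.pyGet? c i) ∘ (fun k : Nat => (k : Int))) k
          = decide (a.toList[k]? ≠ c.toList[k]?) := by
      intro k _
      simp [Function.comp, PySem.Str.pyGet?, PySem.Chars.pyGet?, bne, Bool.beq_eq_decide_eq]
    rw [List.filter_congr (q := fun k => decide (a.toList[k]? ≠ c.toList[k]?))
      (fun k hk => hpred k (List.mem_range.1 hk))]
    set D := (List.range a.toList.length).filter (fun k => decide (a.toList[k]? ≠ c.toList[k]?)) with hD
    constructor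
    · intro h
      rw [Bool.and_eq_true] at h
      obtain ⟨h1, h2⟩ := h
      rw [PySem.List.len_eq] at h1
      have hlen1 : D.length = 1 := by
        simp at h1
        omega
      obtain ⟨d, hDd⟩ := List.length_eq_one_iff.1 hlen1
      have hdD : d ∈ D := by rw [hDd]; exact List.mem_cons_self
      rw [hD, List.mem_filter, List.mem_range] at hdD
      obtain ⟨hdn, hdne⟩ := hdD
      have hdne' : a.toList[d]? ≠ c.toList[d]? := of_decide_eq_true hdne
      have hdc : d < c.toList.length := hlen ▸ hdn
      rw [hDd] at h2
      simp only [List.map_cons, List.map_nil, PySem.List.pyGetD_zero_cons,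
        PySem.Str.pyGet?, PySem.Chars.pyGet?, PySem.List.pyGet?_natCast, List.getElem?_eq_getElem hdc,
        Option.any_some, List.contains_eq_mem, decide_eq_true_eq] at h2
      have hda : d < a.toList.length := hdn
      have hne : a.toList[d] ≠ c.toList[d] := by
        intro hh
        apply hdne'
        rw [List.getElem?_eq_getElem hda, List.getElem?_eq_getElem hdc, hh]
      constructor
      · apply (mem_nbrs a c).2
        refine ⟨d, hdn, c.toList[d], h2, ?_⟩
        apply List.ext_getElem
        · simp [hlen]
        · intro j hj1 hj2
          by_cases hjd : j = d
          · subst hjd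
            rw [List.getElem_set_self]
          · rw [List.getElem_set_ne (by omega)]
            have hjD : j ∉ D := by
              rw [hDd]
              simp only [List.mem_singleton]
              exact hjd
            rw [hD, List.mem_filter, List.mem_range] at hjD
            have : ¬ (a.toList[j]? ≠ c.toList[j]?) := by
              intro hh
              exact hjD ⟨by omega, decide_eq_true hh⟩
            rw [not_not] at this
            have hja : j < a.toList.length := by omega
            rw [List.getElem?_eq_getElem hja, List.getElem?_eq_getElem hj1] at this
            exact (Option.some_inj.1 this).symm
      · intro hh
        subst hh
        exact hne rfl
    · rintro ⟨hmem, hne⟩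
      obtain ⟨k, hk, x, hxm, hset⟩ := (mem_nbrs a c).1 hmem
      have hkc : k < c.toList.length := hlen ▸ hk
      have hck : c.toList[k] = x := by
        have := congrArg (fun l => l[k]?) hset
        simp only [List.getElem?_eq_getElem hkc,
          List.getElem?_set_self' ] at this
        simp only [List.getElem?_eq_getElem hk] at this
        exact Option.some_inj.1 this
      have hxk : x ≠ a.toList[k] := by
        rintro rfl
        rw [List.set_getElem_self] at hset
        exact hne (String.toList_inj.1 hset)
      have hDk : D = [k] := by
        rw [hD]
        apply filter_eq_singleton_of
        · exact List.mem_range.2 hk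
        · apply decide_eq_true
          rw [List.getElem?_eq_getElem hk, List.getElem?_eq_getElem hkc, hck]
          intro hh
          exact hxk (Option.some_inj.1 hh).symm
        · exact List.nodup_range
        · intro j hj hqj
          by_contra hjk
          have hja : j < a.toList.length := List.mem_range.1 hj
          have hjc : j < c.toList.length := hlen ▸ hja
          have hq := of_decide_eq_true hqj
          apply hq
          have := congrArg (fun l => l[j]?) hset
          simp only [List.getElem?_set_ne (show k ≠ j from fun hh => hjk hh.symm)] at this
          rw [this]
      rw [hDk]
      simp only [List.map_cons, List.map_nil, PySem.List.len_eq, List.length_cons,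
        List.length_nil, PySem.List.pyGetD_zero_cons, PySem.Str.pyGet?, PySem.Chars.pyGet?,
        PySem.List.pyGet?_natCast, List.getElem?_eq_getElem hkc, hck,
        Option.any_some, List.contains_eq_mem, Bool.and_eq_true, decide_eq_true_eq]
      exact ⟨by norm_num, hxm⟩
  · constructor
    · intro h
      exfalso
      unfold edgeB at h
      rw [if_pos (by simp only [PySem.Str.len_eq, bne_iff_ne, ne_eq, Nat.cast_inj]; omega)] at h
      simp at h
    · rintro ⟨hmem, _⟩
      exfalso
      obtain ⟨k, hk, x, _, hset⟩ := (mem_nbrs a c).1 hmem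
      have := congrArg List.length hset
      simp only [List.length_set] at this
      omega

inductive Reach (L : List String) (a : String) : String → Prop
  | refl : Reach L a a
  | step {u v : String} : Reach L a u → v ∈ L → edgeB u v = true → Reach L a v

theorem Reach.mono {L L' : List String} {a v : String} (h : ∀ x, x ∈ L → x ∈ L')
    (hr : Reach L a v) : Reach L' a v := by
  induction hr with
  | refl => exact .refl
  | step _ hm he ih => exact .step ih (h _ hm) he

theorem Reach.trans {L : List String} {a b v : String} (h1 : Reach L a b)
    (h2 : Reach L b v) : Reach L a v := by
  induction h2 with
  | refl => exact h1
  | step _ hm he ih => exact .step ih hm he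

theorem Reach.mem_or {L : List String} {a v : String} (h : Reach L a v) : v = a ∨ v ∈ L := by
  induction h with
  | refl => exact .inl rfl
  | step _ hm _ _ => exact .inr hm

theorem Reach.first_step {L : List String} {a v : String} (h : Reach L a v) :
    v = a ∨ ∃ c, edgeB a c = true ∧ c ∈ L ∧ Reach L c v := by
  induction h with
  | refl => exact .inl rfl
  | @step u w _ hm he ih =>
    rcases ih with rfl | ⟨c, hec, hcm, hcr⟩
    · exact .inr ⟨w, he, hm, .refl⟩
    · exact .inr ⟨c, hec, hcm, .step hcr hm he⟩

theorem Reach.drop {L L' : List String} {b v : String}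
    (h : ∀ x, x ∈ L' ↔ x ∈ L ∧ x ≠ b) (hr : Reach L b v) : v = b ∨ Reach L' b v := by
  induction hr with
  | refl => exact .inl rfl
  | @step u w _ hm he ih =>
    by_cases hwb : w = b
    · exact .inl hwb
    · rcases ih with rfl | hr'
      · exact .inr (.step .refl ((h w).2 ⟨hm, hwb⟩) he)
      · exact .inr (.step hr' ((h w).2 ⟨hm, hwb⟩) he)

theorem Reach.avoid {L L' : List String} {b c v : String}
    (h : ∀ x, x ∈ L' ↔ x ∈ L ∧ x ≠ b) (hc : c ≠ b) (hr : Reach L c v) :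
    v = b ∨ Reach L' c v ∨ Reach L' b v := by
  induction hr with
  | refl => exact .inr (.inl .refl)
  | @step u w _ hm he ih =>
    by_cases hwb : w = b
    · exact .inl hwb
    · have hw' : w ∈ L' := (h w).2 ⟨hm, hwb⟩
      rcases ih with rfl | hr' | hr'
      · exact .inr (.inr (.step .refl hw' he))
      · exact .inr (.inl (.step hr' hw' he))
      · exact .inr (.inr (.step hr' hw' he))

theorem Reach.restrict {cur cur' : List String} {c c' v : String}
    (hchar : ∀ x, x ∈ cur' ↔ x ∈ cur ∧ ¬ Reach cur c x)
    (hr : Reach cur c' v) (hnv : ¬ Reach cur c v) : Reach cur' c' v := by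
  induction hr with
  | refl => exact .refl
  | @step u w h1 hm he ih =>
    have hnu : ¬ Reach cur c u := fun hcu => hnv (.step hcu hm he)
    exact .step (ih hnu) ((hchar w).2 ⟨hm, hnv⟩) he

theorem Reach.layer {left left' ts : List String} {u s v : String}
    (hs : s ∉ left)
    (hts : ∀ x, x ∈ ts ↔ x ∈ left ∧ edgeB u x = true)
    (hl' : ∀ x, x ∈ left' ↔ x ∈ left ∧ edgeB u x = false)
    (hr : Reach left s v) (hv : v ∈ left) :
    v ∈ ts ∨ Reach left' s v ∨ ∃ c, c ∈ ts ∧ Reach left' c v := by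
  induction hr with
  | refl => exact absurd hv hs
  | @step w v' h1 hm he ih =>
    by_cases hvts : v' ∈ ts
    · exact .inl hvts
    · have hv' : v' ∈ left' := by
        refine (hl' v').2 ⟨hm, ?_⟩
        by_contra hne
        exact hvts ((hts v').2 ⟨hm, by revert hne; cases edgeB u v' <;> simp⟩)
      rcases Reach.mem_or h1 with rfl | hwm
      · exact .inr (.inl (.step .refl hv' he))
      · rcases ih hwm with hwts | hr' | ⟨c, hc, hr'⟩
        · exact .inr (.inr ⟨w, hwts, .step .refl hv' he⟩)
        · exact .inr (.inl (.step hr' hv' he))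
        · exact .inr (.inr ⟨c, hc, .step hr' hv' he⟩)

theorem loop_char (f : Nat)
    (hA : ∀ a l, l.Nodup → a ∈ l → l.length ≤ f →
      (dfsA f a l).Sublist l ∧ ∀ v, (v ∈ dfsA f a l ↔ v ∈ l ∧ ¬ Reach l a v)) :
    ∀ cs cur, cur.Nodup → cur.length ≤ f →
      (dfsLoop f cs cur).Sublist cur ∧
        ∀ v, (v ∈ dfsLoop f cs cur ↔ v ∈ cur ∧ ∀ c, c ∈ cs → c ∈ cur → ¬ Reach cur c v) := by
  intro cs
  induction cs with
  | nil =>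
    intro cur _ _
    constructor
    · simp [dfsLoop]
    · simp [dfsLoop]
  | cons c cs ih =>
    intro cur hnd hlen
    by_cases hc : c ∈ cur
    · have hunf : dfsLoop f (c :: cs) cur = dfsLoop f cs (dfsA f c cur) := by
        simp [dfsLoop, if_pos hc]
      obtain ⟨subA, charA⟩ := hA c cur hnd hc hlen
      have hnd' : (dfsA f c cur).Nodup := hnd.sublist subA
      have hlen' : (dfsA f c cur).length ≤ f := le_trans subA.length_le hlen
      obtain ⟨subL, charL⟩ := ih (dfsA f c cur) hnd' hlen'
      rw [hunf]
      refine ⟨subL.trans subA, ?_⟩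
      intro v
      constructor
      · intro hv
        obtain ⟨hv', hall'⟩ := (charL v).1 hv
        obtain ⟨hvcur, hnvc⟩ := (charA v).1 hv'
        refine ⟨hvcur, ?_⟩
        intro c' hc' hc'cur hR
        rcases List.mem_cons.1 hc' with rfl | hc'cs
        · exact hnvc hR
        · by_cases hRc : Reach cur c c'
          · exact hnvc (hRc.trans hR)
          · have hc'' : c' ∈ dfsA f c cur := (charA c').2 ⟨hc'cur, hRc⟩
            exact hall' c' hc'cs hc'' (Reach.restrict (fun x => charA x) hR hnvc)
      · rintro ⟨hvcur, hall⟩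
        have hnvc : ¬ Reach cur c v := hall c (List.mem_cons_self) hc
        have hv' : v ∈ dfsA f c cur := (charA v).2 ⟨hvcur, hnvc⟩
        refine (charL v).2 ⟨hv', ?_⟩
        intro c' hc'cs hc'cur' hR'
        have hc'cur : c' ∈ cur := ((charA c').1 hc'cur').1
        exact hall c' (List.mem_cons_of_mem _ hc'cs) hc'cur
          (hR'.mono (fun x hx => ((charA x).1 hx).1))
    · have hunf : dfsLoop f (c :: cs) cur = dfsLoop f cs cur := by
        simp [dfsLoop, if_neg hc]
      obtain ⟨subL, charL⟩ := ih cur hnd hlen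
      rw [hunf]
      refine ⟨subL, ?_⟩
      intro v
      rw [charL v]
      constructor
      · rintro ⟨h1, h2⟩
        refine ⟨h1, ?_⟩
        intro c' hc' hc'cur
        rcases List.mem_cons.1 hc' with rfl | hcs
        · exact absurd hc'cur hc
        · exact h2 c' hcs hc'cur
      · rintro ⟨h1, h2⟩
        exact ⟨h1, fun c' hcs => h2 c' (List.mem_cons_of_mem _ hcs)⟩

theorem dfs_char : ∀ f : Nat, ∀ a l, l.Nodup → a ∈ l → l.length ≤ f →
    (dfsA f a l).Sublist l ∧ ∀ v, (v ∈ dfsA f a l ↔ v ∈ l ∧ ¬ Reach l a v) := by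
  intro f
  induction f with
  | zero =>
    intro a l _ ha hl
    rw [Nat.le_zero, List.length_eq_zero_iff] at hl
    subst hl
    simp at ha
  | succ f ihf =>
    intro a l hnd ha hl
    have hunf : dfsA (f + 1) a l = dfsLoop f (nbrs a) (PySem.Set.discard l a) := by
      simp [dfsA]
    have hmem : ∀ x, x ∈ PySem.Set.discard l a ↔ x ∈ l ∧ x ≠ a := by
      intro x; exact PySem.Set.mem_discard l a x
    have sub0 : (PySem.Set.discard l a).Sublist l := List.filter_sublist
    have hnd' : (PySem.Set.discard l a).Nodup := hnd.sublist sub0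
    have hlen' : (PySem.Set.discard l a).length ≤ f := by
      have hle := sub0.length_le
      have hne : (PySem.Set.discard l a).length ≠ l.length := by
        intro h
        have heq := sub0.eq_of_length h
        have ha' : a ∈ PySem.Set.discard l a := by rw [heq]; exact ha
        exact ((hmem a).1 ha').2 rfl
      omega
    obtain ⟨subL, charL⟩ := loop_char f ihf (nbrs a) _ hnd' hlen'
    rw [hunf]
    refine ⟨subL.trans sub0, ?_⟩
    intro v
    rw [charL v]
    constructor
    · rintro ⟨hvcur, hall⟩
      obtain ⟨hvl, hva⟩ := (hmem v).1 hvcur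
      refine ⟨hvl, ?_⟩
      intro hR
      rcases hR.first_step with rfl | ⟨c, hec, hcl, hcr⟩
      · exact hva rfl
      · obtain ⟨hcnb, hca⟩ := (nbrs_edge a c).1 hec
        have hccur : c ∈ PySem.Set.discard l a := (hmem c).2 ⟨hcl, hca⟩
        rcases Reach.avoid hmem hca hcr with rfl | hr' | hr'
        · exact hva rfl
        · exact hall c hcnb hccur hr'
        · rcases hr'.first_step with rfl | ⟨c2, hec2, hc2cur, hcr2⟩
          · exact hva rfl
          · obtain ⟨hc2nb, _⟩ := (nbrs_edge a c2).1 hec2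
            exact hall c2 hc2nb hc2cur hcr2
    · rintro ⟨hvl, hnR⟩
      have hva : v ≠ a := by rintro rfl; exact hnR .refl
      refine ⟨(hmem v).2 ⟨hvl, hva⟩, ?_⟩
      intro c hcnb hccur hRcur
      obtain ⟨hcl, hca⟩ := (hmem c).1 hccur
      have hedge : edgeB a c = true := (nbrs_edge a c).2 ⟨hcnb, hca⟩
      have hac : Reach l a c := .step .refl hcl hedge
      exact hnR (hac.trans (hRcur.mono (fun x hx => ((hmem x).1 hx).1)))

theorem bfs_char_aux (n : Nat) : ∀ (stack left : List String),
    stack.length + 2 * left.length ≤ n → left.Nodup → (∀ s ∈ stack, s ∉ left) →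
    ((bfsLoop stack left).Sublist left) ∧
      ∀ v, (v ∈ bfsLoop stack left ↔ v ∈ left ∧ ∀ u, u ∈ stack → ¬ Reach left u v) := by
  induction n with
  | zero =>
    intro stack left hlen _ _
    match stack with
    | [] =>
      constructor
      · simp [bfsLoop]
      · simp [bfsLoop]
    | u :: rest => simp at hlen
  | succ n ihn =>
    intro stack left hlen hnd hdisj
    match stack with
    | [] =>
      constructor
      · simp [bfsLoop]
      · simp [bfsLoop]
    | u :: rest =>
      have hunf : bfsLoop (u :: rest) left =
          bfsLoop (rest ++ left.filter (fun w => edgeB u w))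
            (left.filter (fun x => !((left.filter (fun w => edgeB u w)).contains x))) := by
        rw [← foldl_discard]
        simp [bfsLoop]
      set ts := left.filter (fun w => edgeB u w) with hts_def
      set nl := left.filter (fun x => !(ts.contains x)) with hnl_def
      have hts : ∀ x, x ∈ ts ↔ x ∈ left ∧ edgeB u x = true := by
        intro x; simp [hts_def, List.mem_filter]
      have hnl : ∀ x, x ∈ nl ↔ x ∈ left ∧ edgeB u x = false := by
        intro x
        simp only [hnl_def, List.mem_filter, Bool.not_eq_eq_eq_not, Bool.not_true,
          List.contains_eq_mem, decide_eq_false_iff_not]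
        constructor
        · rintro ⟨h1, h2⟩
          refine ⟨h1, ?_⟩
          by_contra hne
          exact h2 ((hts x).2 ⟨h1, by revert hne; cases edgeB u x <;> simp⟩)
        · rintro ⟨h1, h2⟩
          exact ⟨h1, fun hx => by simp [(hts x).1 hx] at *⟩
      have hsubnl : nl.Sublist left := List.filter_sublist
      have hndnl : nl.Nodup := hnd.sublist hsubnl
      have hdisj' : ∀ s ∈ rest ++ ts, s ∉ nl := by
        intro s hs hsnl
        rcases List.mem_append.1 hs with hs | hs
        · exact hdisj s (List.mem_cons_of_mem _ hs) (hsubnl.subset hsnl)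
        · have := ((hts s).1 hs).2
          have := ((hnl s).1 hsnl).2
          simp_all
      have hmeas : (rest ++ ts).length + 2 * nl.length ≤ n := by
        have := bfs_dec u rest left
        rw [foldl_discard] at this
        simp only [← hts_def, ← hnl_def] at this
        simp only [List.length_cons, List.length_append] at this hlen ⊢
        omega
      obtain ⟨subIH, charIH⟩ := ihn (rest ++ ts) nl hmeas hndnl hdisj'
      rw [hunf]
      refine ⟨subIH.trans hsubnl, ?_⟩
      intro v
      rw [charIH v]
      constructor
      · rintro ⟨hvnl, hall⟩
        obtain ⟨hvleft, hvedge⟩ := (hnl v).1 hvnl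
        refine ⟨hvleft, ?_⟩
        intro u' hu' hR
        have hnots : v ∉ ts := fun hvts => by simp [(hts v).1 hvts] at *
        rcases List.mem_cons.1 hu' with rfl | hu'rest
        · rcases Reach.layer (hdisj u' List.mem_cons_self) hts hnl hR hvleft with hvts | hr' | ⟨c, hcts, hcr⟩
          · exact hnots hvts
          · rcases hr'.first_step with rfl | ⟨c, hec, hcnl, _⟩
            · exact hdisj v List.mem_cons_self hvleft
            · have := ((hnl c).1 hcnl).2
              simp [hec] at this
          · exact hall c (List.mem_append_right _ hcts) hcr
        · rcases Reach.layer (hdisj u' (List.mem_cons_of_mem _ hu'rest)) hts hnl hR hvleft with hvts | hr' | ⟨c, hcts, hcr⟩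
          · exact hnots hvts
          · exact hall u' (List.mem_append_left _ hu'rest) hr'
          · exact hall c (List.mem_append_right _ hcts) hcr
      · rintro ⟨hvleft, hall⟩
        have hnRu : ¬ Reach left u v := hall u List.mem_cons_self
        have hvedge : edgeB u v = false := by
          by_contra hne
          exact hnRu (.step .refl hvleft (by revert hne; cases edgeB u v <;> simp))
        refine ⟨(hnl v).2 ⟨hvleft, hvedge⟩, ?_⟩
        intro u' hu' hR
        have hRleft : Reach left u' v := hR.mono (fun x hx => (hsubnl.subset hx))
        rcases List.mem_append.1 hu' with hu'rest | hu'ts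
        · exact hall u' (List.mem_cons_of_mem _ hu'rest) hRleft
        · obtain ⟨hu'left, hu'edge⟩ := (hts u').1 hu'ts
          exact hnRu ((Reach.step .refl hu'left hu'edge).trans hRleft)

theorem filter_mem_of_sublist {s l : List String} (h : s.Sublist l) (hnd : l.Nodup) :
    l.filter (fun x => decide (x ∈ s)) = s := by
  induction h with
  | slnil => simp
  | cons a h ih =>
    rename_i s' l'
    have hna : a ∉ l' := (List.nodup_cons.1 hnd).1
    have hnas : a ∉ s' := fun hm => hna (h.subset hm)
    rw [List.filter_cons]
    simp only [hnas, decide_false]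
    exact ih (List.nodup_cons.1 hnd).2
  | cons₂ a h ih =>
    rename_i s' l'
    have hna : a ∉ l' := (List.nodup_cons.1 hnd).1
    rw [List.filter_cons]
    simp only [List.mem_cons, true_or, decide_true, if_true]
    congr 1
    rw [List.filter_congr (q := fun x => decide (x ∈ s')), ih (List.nodup_cons.1 hnd).2]
    intro x hx
    have hxa : x ≠ a := fun hh => hna (hh ▸ hx)
    simp [hxa]

theorem inner_eq (l : List String) (a : String) (hnd : l.Nodup) (ha : a ∈ l) :
    dfsA l.length a l = bfsLoop [a] (PySem.Set.discard l a) := by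
  obtain ⟨subA, charA⟩ := dfs_char l.length a l hnd ha le_rfl
  have hmem : ∀ x, x ∈ PySem.Set.discard l a ↔ x ∈ l ∧ x ≠ a := fun x =>
    PySem.Set.mem_discard l a x
  have hsub0 : (PySem.Set.discard l a).Sublist l := List.filter_sublist
  obtain ⟨subB, charB⟩ := bfs_char_aux (1 + 2 * (PySem.Set.discard l a).length) [a]
    (PySem.Set.discard l a) (by simp) (hnd.sublist hsub0)
    (by intro s hs; simp at hs; subst hs; intro hm; exact ((hmem _).1 hm).2 rfl)
  have hiff : ∀ v, v ∈ dfsA l.length a l ↔ v ∈ bfsLoop [a] (PySem.Set.discard l a) := by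
    intro v
    rw [charA v, charB v]
    constructor
    · rintro ⟨hvl, hnR⟩
      have hva : v ≠ a := fun hh => hnR (hh ▸ Reach.refl)
      refine ⟨(hmem v).2 ⟨hvl, hva⟩, ?_⟩
      intro u hu hR
      simp at hu; subst hu
      exact hnR (hR.mono (fun x hx => ((hmem x).1 hx).1))
    · rintro ⟨hvd, hall⟩
      obtain ⟨hvl, hva⟩ := (hmem v).1 hvd
      refine ⟨hvl, ?_⟩
      intro hR
      rcases hR.drop hmem with rfl | hR'
      · exact hva rfl
      · exact hall a (by simp) hR'
  rw [← filter_mem_of_sublist subA hnd, ← filter_mem_of_sublist (subB.trans hsub0) hnd]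
  apply List.filter_congr
  intro x _
  simp [hiff x]

theorem outer_eq (gs : List String) : ∀ (left : List String) (ans : Int), left.Nodup →
    gs.foldl (fun (st : List String × Int) i =>
        if i ∈ st.1 then (dfsA st.1.length i st.1, st.2 + 1) else st) (left, ans)
      = gs.foldl (fun (st : List String × Int) g =>
        if g ∈ st.1 then (bfsLoop [g] (PySem.Set.discard st.1 g), st.2 + 1) else st) (left, ans) := by
  induction gs with
  | nil => intro left ans _; rfl
  | cons g gs ih =>
    intro left ans hnd
    simp only [List.foldl_cons]
    by_cases hg : g ∈ left
    · simp only [if_pos hg]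
      rw [inner_eq left g hnd hg]
      refine ih _ _ ?_
      rw [← inner_eq left g hnd hg]
      exact hnd.sublist ((dfs_char left.length g left hnd hg le_rfl).1)
    · simp only [if_neg hg]
      exact ih left ans hnd

theorem solve_eq_alt (genes : List String) : solve genes = solve_alt genes := by
  unfold solve solve_alt
  rw [outer_eq genes (PySem.Set.ofList genes) 0 (PySem.Set.nodup_ofList genes)]

-- ===== VERDICT (by name: the statement is the Claim_ definition above) =====
theorem solve_spec : Claim_equal_solve := by
  intro genes _
  unfold Spec_solve
  exact solve_eq_alt genes
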